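-- pv_equiv track=rewrite | github.com/jeffplays2005/courses | Computer Science 130/lab 20 - Exam Revision/q3.py | evaluate_f
-- ===== SOURCE A (Python) =====
-- def evaluate_f(n):
--     if n == 0:
--         return (-1, 0)
--     else:
--         if n == 1:
--             return (2, 0)
--         else:
--             f1, count1 = evaluate_f(n-1)
--             f2, count2 = evaluate_f(n-2)
--             total = f1 + 3 * f2
--
--             result = (total, count1+count2+2)
--             return result
-- ===== SOURCE B (Python) =====
-- def evaluate_f(n):
--     if n == 0:
--         return (-1, 0)
--     prev, cur = (-1, 0), (2, 0)
--     for _ in range(n - 1):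
--         prev, cur = cur, (cur[0] + 3 * prev[0], cur[1] + prev[1] + 2)
--     return cur
-- ===== Notes on version B (the rewrite author's own statement) =====
-- stated objective: faster
-- what changed: Replaces the exponential double recursion with a bottom-up loop carrying the last two (value, count) pairs; intended as faster (A timed out at n=16 while B returned; B measured 6.09x at the largest size both finished).
import Mathlib
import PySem

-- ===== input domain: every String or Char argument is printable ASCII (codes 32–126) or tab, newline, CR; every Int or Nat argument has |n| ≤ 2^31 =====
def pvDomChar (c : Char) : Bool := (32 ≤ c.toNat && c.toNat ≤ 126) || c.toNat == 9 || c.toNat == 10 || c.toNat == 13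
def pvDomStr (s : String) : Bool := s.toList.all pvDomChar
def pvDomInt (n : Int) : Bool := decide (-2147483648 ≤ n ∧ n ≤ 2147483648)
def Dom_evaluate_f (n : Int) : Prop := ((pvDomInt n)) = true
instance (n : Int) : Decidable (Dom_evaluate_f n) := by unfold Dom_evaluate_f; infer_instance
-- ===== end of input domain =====

-- B replaces A's exponential double recursion with a bottom-up loop keeping the last two
-- (value, count) pairs; intended as faster (measured 6.09x at the largest size both Pythons finished; A timed out beyond). Python's tuple result is rendered as a 2-element list.

-- ===== PORT A =====
-- A's recursion, step for step, on the Nat measure of n (A raises RecursionError for n < 0,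
-- excluded by Pre_; there toNat maps to the n = 0 base case, outside the claim).
def evalAuxA : Nat → Int × Int
  | 0 => (-1, 0)
  | 1 => (2, 0)
  | (k+2) =>
      let p1 := evalAuxA (k+1)
      let p2 := evalAuxA k
      let total := p1.1 + 3 * p2.1
      (total, p1.2 + p2.2 + 2)

def evaluate_f (n : Int) : List Int :=
  let r := evalAuxA n.toNat
  [r.1, r.2]

-- ===== PORT B =====
def evaluate_f_alt (n : Int) : List Int :=
  if n = 0 then [-1, 0]
  else
    let s := (PySem.List.pyRange 0 (n - 1) 1).foldl
      (fun (s : (Int × Int) × (Int × Int)) _ =>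
        let prev := s.1
        let cur := s.2
        (cur, (cur.1 + 3 * prev.1, cur.2 + prev.2 + 2)))
      ((-1, 0), (2, 0))
    [s.2.1, s.2.2]

-- ===== PRECONDITION & SPEC =====
-- A recurses without reaching a base case for n < 0 (RecursionError): excluded.
def Pre_evaluate_f (n : Int) : Prop := 0 ≤ n
instance (n : Int) : Decidable (Pre_evaluate_f n) := by unfold Pre_evaluate_f; infer_instance
def pvWitness_evaluate_f : Int := (5)

def Spec_evaluate_f (n : Int) (out : List Int) : Prop := out = evaluate_f_alt n
instance (n : Int) (out : List Int) : Decidable (Spec_evaluate_f n out) := by unfold Spec_evaluate_f; infer_instance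

-- ===== CLAIM (what is proved, stated in full; the proofs are below) =====
def Claim_equal_evaluate_f : Prop := ∀ (n : Int), Dom_evaluate_f n → Pre_evaluate_f n → Spec_evaluate_f n (evaluate_f n)

-- ===== LEMMAS AND PROOFS =====

theorem evalAuxA_succ_succ (k : Nat) :
    evalAuxA (k+2) = ((evalAuxA (k+1)).1 + 3 * (evalAuxA k).1,
                      (evalAuxA (k+1)).2 + (evalAuxA k).2 + 2) := by
  simp [evalAuxA]

-- The loop, run over any list, advances the (prev, cur) pair along evalAuxA.
theorem loop_invariant (l : List Int) (k : Nat) :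
    l.foldl
      (fun (s : (Int × Int) × (Int × Int)) _ =>
        let prev := s.1
        let cur := s.2
        (cur, (cur.1 + 3 * prev.1, cur.2 + prev.2 + 2)))
      (evalAuxA k, evalAuxA (k+1))
    = (evalAuxA (k + l.length), evalAuxA (k + l.length + 1)) := by
  induction l generalizing k with
  | nil => simp
  | cons x xs ih =>
      have h := ih (k+1)
      simp only [List.foldl_cons, List.length_cons]
      rw [show ((evalAuxA (k+1)).1 + 3 * (evalAuxA k).1,
                (evalAuxA (k+1)).2 + (evalAuxA k).2 + 2) = evalAuxA (k+1+1) from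
            (evalAuxA_succ_succ k).symm]
      rw [h]
      congr 1 <;> congr 1 <;> omega

theorem evaluate_f_spec : Claim_equal_evaluate_f := by
  intro n _ hpre
  unfold Pre_evaluate_f at hpre
  unfold Spec_evaluate_f evaluate_f evaluate_f_alt
  by_cases h0 : n = 0
  · subst h0; decide
  · simp only [if_neg h0]
    have h1 : 1 ≤ n := by omega
    have hbase : ((-1 : Int), (0 : Int)) = evalAuxA 0 ∧ ((2 : Int), (0 : Int)) = evalAuxA 1 := by
      constructor <;> rfl
    rw [hbase.1, hbase.2, loop_invariant]
    have hlen : (PySem.List.pyRange 0 (n-1) 1).length = (n-1).toNat := by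
      simp [PySem.List.length_pyRange_one]
    rw [hlen]
    have : 0 + (n-1).toNat + 1 = n.toNat := by omega
    rw [this]
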